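-- pv_equiv track=rewrite | github.com/vipulbhatt-monks/dev2-backend | routes/requirements.py | _build_full_doc
-- ===== SOURCE A (Python) =====
-- ORDERED_SECTIONS = [
--     "1. Introduction",
--     "2. Overall Description",
--     "3. System Features",
--     "4. External Interface Requirements",
--     "5. Other Nonfunctional Requirements",
--     "Appendix B: Analysis Models",
-- ]
--
-- def _build_full_doc(project_name: str, requirements: dict) -> str:
--     full_doc = f"# {project_name} - Software Requirements Specification\n\n"
--     for title in ORDERED_SECTIONS:
--         if title in requirements:
--             full_doc += f"## {title}\n\n{requirements[title]}\n\n---\n\n"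
--     for title, content in requirements.items():
--         if title not in ORDERED_SECTIONS:
--             full_doc += f"## {title}\n\n{content}\n\n---\n\n"
--     return full_doc
-- ===== SOURCE B (Python) =====
-- ORDERED_SECTIONS = [
--     "1. Introduction",
--     "2. Overall Description",
--     "3. System Features",
--     "4. External Interface Requirements",
--     "5. Other Nonfunctional Requirements",
--     "Appendix B: Analysis Models",
-- ]
--
-- def _build_full_doc(project_name: str, requirements: dict) -> str:
--     rank = {t: i for i, t in enumerate(ORDERED_SECTIONS)}
--     items = sorted(requirements.items(),
--                    key=lambda kv: rank.get(kv[0], len(ORDERED_SECTIONS)))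
--     return "".join(
--         [f"# {project_name} - Software Requirements Specification\n\n"]
--         + [f"## {t}\n\n{c}\n\n---\n\n" for t, c in items]
--     )
-- ===== Notes on version B (the rewrite author's own statement) =====
-- stated objective: simpler
-- what changed: Replaces A's two membership-guarded loops (one over ORDERED_SECTIONS with dict lookups, one over the dict with a list membership test) by ONE stable sort of the items under a rank key (index in ORDERED_SECTIONS, unknown sections ranked last so stability keeps their insertion order) followed by a single join.
import Mathlib
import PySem

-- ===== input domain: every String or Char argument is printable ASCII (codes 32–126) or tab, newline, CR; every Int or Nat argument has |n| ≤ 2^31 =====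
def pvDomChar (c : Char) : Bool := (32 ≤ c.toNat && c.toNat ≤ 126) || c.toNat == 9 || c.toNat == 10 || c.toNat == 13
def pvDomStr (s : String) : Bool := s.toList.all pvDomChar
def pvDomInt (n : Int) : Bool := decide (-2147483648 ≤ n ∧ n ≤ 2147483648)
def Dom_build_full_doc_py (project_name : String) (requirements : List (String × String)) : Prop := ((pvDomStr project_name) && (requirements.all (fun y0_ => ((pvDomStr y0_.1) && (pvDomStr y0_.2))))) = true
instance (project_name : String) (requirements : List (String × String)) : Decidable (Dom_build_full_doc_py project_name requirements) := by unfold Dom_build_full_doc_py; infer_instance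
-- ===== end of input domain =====

-- B replaces A's two membership-guarded loops by ONE stable sort of the items under a rank key
-- (index in ORDERED_SECTIONS, unknown sections ranked last, so stability keeps their insertion
-- order) followed by a single join; objective: simpler.

-- ===== PORT A =====
def pvOrderedSections : List String :=
  ["1. Introduction",
   "2. Overall Description",
   "3. System Features",
   "4. External Interface Requirements",
   "5. Other Nonfunctional Requirements",
   "Appendix B: Analysis Models"]

def build_full_doc_py (project_name : String) (requirements : List (String × String)) : String :=
  let req : PySem.Dict String String := PySem.Dict.mk requirements
  let full_doc := "# " ++ project_name ++ " - Software Requirements Specification\n\n"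
  let full_doc := pvOrderedSections.foldl (fun full_doc title =>
      if req.contains title then
        full_doc ++ ("## " ++ title ++ "\n\n" ++ req.getD title "" ++ "\n\n---\n\n")
      else full_doc) full_doc
  let full_doc := req.items.foldl (fun full_doc p =>
      if pvOrderedSections.contains p.1 then full_doc
      else full_doc ++ ("## " ++ p.1 ++ "\n\n" ++ p.2 ++ "\n\n---\n\n")) full_doc
  full_doc

-- ===== PORT B =====
-- rank = {t: i for i, t in enumerate(ORDERED_SECTIONS)}
def pvRank : PySem.Dict String Int :=
  (PySem.List.enumerate pvOrderedSections 0).foldl (fun d p => d.insert p.2 (p.1 : Int)) PySem.Dict.empty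

def build_full_doc_py_alt (project_name : String) (requirements : List (String × String)) : String :=
  let items := PySem.List.sorted requirements
      (fun kv => pvRank.getD kv.1 ((pvOrderedSections.length : Int))) false
  PySem.Str.join ""
    (("# " ++ project_name ++ " - Software Requirements Specification\n\n")
      :: items.map (fun kv => "## " ++ kv.1 ++ "\n\n" ++ kv.2 ++ "\n\n---\n\n"))

-- ===== PRECONDITION & SPEC =====
-- Pre_ excludes association lists with duplicate keys: they do not correspond to any Python dict
-- (A's parameter is a dict, which cannot hold duplicate keys), so the assoc-list model is ambiguous there.
def Pre_build_full_doc_py (project_name : String) (requirements : List (String × String)) : Prop :=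
  (requirements.map Prod.fst).Nodup

instance (project_name : String) (requirements : List (String × String)) : Decidable (Pre_build_full_doc_py project_name requirements) := by unfold Pre_build_full_doc_py; infer_instance

def pvWitness_build_full_doc_py : String × (List (String × String)) :=
  ("Proj", [("1. Introduction", "intro text"), ("Custom Notes", "notes")])

def Spec_build_full_doc_py (project_name : String) (requirements : List (String × String)) (out : String) : Prop := out = build_full_doc_py_alt project_name requirements
instance (project_name : String) (requirements : List (String × String)) (out : String) : Decidable (Spec_build_full_doc_py project_name requirements out) := by unfold Spec_build_full_doc_py; infer_instance

-- ===== CLAIM =====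
def Claim_equal_build_full_doc_py : Prop := ∀ (project_name : String) (requirements : List (String × String)), Dom_build_full_doc_py project_name requirements → Pre_build_full_doc_py project_name requirements → Spec_build_full_doc_py project_name requirements (build_full_doc_py project_name requirements)

-- ===== LEMMAS AND PROOFS =====

def pvBlock (p : String × String) : String :=
  "## " ++ p.1 ++ "\n\n" ++ p.2 ++ "\n\n---\n\n"

def pvKey (t : String) : Int := pvRank.getD t ((pvOrderedSections.length : Int))

theorem pvFlatten_intersperse_nil {α : Type} (ls : List (List α)) :
    (List.intersperse [] ls).flatten = ls.flatten := by
  induction ls with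
  | nil => rfl
  | cons h t ih => cases t <;> simp_all [List.intersperse]

theorem pvToList_join (parts : List String) :
    (PySem.Str.join "" parts).toList = (parts.map String.toList).flatten := by
  simp [PySem.Str.toList_join, PySem.Chars.join, List.intercalate, pvFlatten_intersperse_nil]

theorem pvFoldl_str_if {α : Type} (L : List α) (c : α → Bool) (f : α → String) (s : String) :
    (L.foldl (fun acc x => if c x then acc ++ f x else acc) s).toList
      = s.toList ++ ((L.filter c).map (fun x => (f x).toList)).flatten := by
  induction L generalizing s with
  | nil => simp
  | cons h t ih => by_cases hc : c h <;> simp [hc, ih]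

theorem pvFoldl_str_unless {α : Type} (L : List α) (c : α → Bool) (f : α → String) (s : String) :
    (L.foldl (fun acc x => if c x then acc else acc ++ f x) s).toList
      = s.toList ++ ((L.filter (fun x => !c x)).map (fun x => (f x).toList)).flatten := by
  induction L generalizing s with
  | nil => simp
  | cons h t ih => by_cases hc : c h <;> simp [hc, ih]

theorem pvStr_ext (s t : String) (h : s.toList = t.toList) : s = t := by
  simpa using congrArg String.ofList h

theorem pvFlatMap_congr {α β : Type} (l : List β) (f g : β → List α)
    (h : ∀ i ∈ l, f i = g i) : l.flatMap f = l.flatMap g := by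
  induction l with
  | nil => rfl
  | cons a t ih =>
    simp only [List.flatMap_cons, h a List.mem_cons_self,
      ih (fun i hi => h i (List.mem_cons_of_mem _ hi))]

-- insertBy passes over a prefix in which nothing goes after x
theorem pvInsertBy_append {α : Type} (before : α → α → Bool) (x : α) (A B : List α)
    (h : ∀ y ∈ A, before x y = false) :
    PySem.List.insertBy before x (A ++ B) = A ++ PySem.List.insertBy before x B := by
  induction A with
  | nil => simp
  | cons a t ih =>
    have ha : before x a = false := h a List.mem_cons_self
    simp [PySem.List.insertBy, ha, ih (fun y hy => h y (List.mem_cons_of_mem _ hy))]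

-- insertBy stops immediately when everything goes after x
theorem pvInsertBy_front {α : Type} (before : α → α → Bool) (x : α) (B : List α)
    (h : ∀ y ∈ B, before x y = true) :
    PySem.List.insertBy before x B = x :: B := by
  cases B with
  | nil => rfl
  | cons b t => simp [PySem.List.insertBy, h b List.mem_cons_self]

-- inserting x into the bucket decomposition appends it to the end of its own bucket
theorem pvInsertBy_buckets {α : Type} (key : α → Int) (x : α) (ks : List Int) (L : List α)
    (hks : ks.Pairwise (· < ·)) (hx : key x ∈ ks) :
    PySem.List.insertBy (fun a b => decide (key a < key b)) x
        (ks.flatMap (fun i => L.filter (fun p => key p == i)))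
      = ks.flatMap (fun i => (L ++ [x]).filter (fun p => key p == i)) := by
  induction ks with
  | nil => simp at hx
  | cons k ks' ih =>
    have hlt : ∀ j ∈ ks', k < j := (List.pairwise_cons.mp hks).1
    have hks' := (List.pairwise_cons.mp hks).2
    have hfa : ∀ i : Int, (L ++ [x]).filter (fun p => key p == i)
        = L.filter (fun p => key p == i) ++ (if key x == i then [x] else []) := by
      intro i
      by_cases h : key x = i
      · simp [List.filter_append, List.filter, h]
      · have h' : (key x == i) = false := by simpa using h
        simp [List.filter_append, List.filter, h']
    by_cases hxk : key x = k
    · -- x belongs to the head bucket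
      have hpass : ∀ y ∈ L.filter (fun p => key p == k),
          (decide (key x < key y)) = false := by
        intro y hy
        have : key y = k := by simpa using (List.mem_filter.mp hy).2
        simp [this, hxk]
      have hfront : ∀ y ∈ ks'.flatMap (fun i => L.filter (fun p => key p == i)),
          (decide (key x < key y)) = true := by
        intro y hy
        obtain ⟨i, hi, hyf⟩ := List.mem_flatMap.mp hy
        have : key y = i := by simpa using (List.mem_filter.mp hyf).2
        simp [this, hxk]; exact hlt i hi
      have htail : ∀ i ∈ ks', (L ++ [x]).filter (fun p => key p == i)
          = L.filter (fun p => key p == i) := by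
        intro i hi
        have : (key x == i) = false := by
          have := hlt i hi; simp [hxk]; omega
        simp [hfa, this]
      rw [List.flatMap_cons, pvInsertBy_append _ _ _ _ hpass,
          pvInsertBy_front _ _ _ hfront, List.flatMap_cons, hfa,
          pvFlatMap_congr ks' _ _ htail]
      simp [hxk]
    · -- x belongs to a later bucket
      have hx' : key x ∈ ks' := by
        rcases List.mem_cons.mp hx with h | h
        · exact absurd h hxk
        · exact h
      have hkx : k < key x := hlt _ hx'
      have hpass : ∀ y ∈ L.filter (fun p => key p == k),
          (decide (key x < key y)) = false := by
        intro y hy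
        have : key y = k := by simpa using (List.mem_filter.mp hy).2
        simp [this]; omega
      have hhead : (L ++ [x]).filter (fun p => key p == k)
          = L.filter (fun p => key p == k) := by
        have : (key x == k) = false := by simp [hxk]
        simp [hfa, this]
      rw [List.flatMap_cons, pvInsertBy_append _ _ _ _ hpass, ih hks' hx',
          List.flatMap_cons, hhead]

-- Python's stable sort under an Int key = concatenation of the key buckets in key order
theorem pvSorted_buckets {α : Type} (key : α → Int) (ks : List Int)
    (hks : ks.Pairwise (· < ·)) (L : List α) (hL : ∀ p ∈ L, key p ∈ ks) :
    PySem.List.sorted L key false = ks.flatMap (fun i => L.filter (fun p => key p == i)) := by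
  rw [PySem.List.sorted_eq_foldl_insertBy]
  induction L using List.reverseRecOn with
  | nil => simp
  | append_singleton L x ih =>
    rw [List.foldl_append, List.foldl_cons, List.foldl_nil,
        ih (fun p hp => hL p (List.mem_append_left _ hp)),
        pvInsertBy_buckets key x ks L hks (hL x (List.mem_append_right _ List.mem_cons_self))]

-- with Nodup keys, filtering on one key is the dict lookup
theorem pvFilter_eq_lookup (req : List (String × String))
    (hnd : (req.map Prod.fst).Nodup) (s : String) :
    req.filter (fun p => s == p.1)
      = (match (PySem.Dict.mk req).get? s with
         | some c => [(s, c)]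
         | none => []) := by
  induction req with
  | nil => simp [PySem.Dict.get?]
  | cons p rest ih =>
    obtain ⟨k, c⟩ := p
    have hk : k ∉ rest.map Prod.fst := (List.nodup_cons.mp hnd).1
    have hnd' := (List.nodup_cons.mp hnd).2
    by_cases hks : k = s
    · subst hks
      have hrest : rest.filter (fun p => k == p.1) = [] := by
        rw [List.filter_eq_nil_iff]
        intro p hp hbe
        simp at hbe
        exact hk (by simpa using ⟨p.2, by rw [hbe]; simpa using hp⟩)
      rw [PySem.Dict.get?_mk_cons]
      simp [hrest]
    · have hbe : (k == s) = false := by simpa using hks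
      have hbe' : (s == k) = false := by simpa using Ne.symm hks
      rw [PySem.Dict.get?_mk_cons, hbe]
      simp only [Bool.false_eq_true, if_false]
      rw [← ih hnd']
      simp [hbe']

-- flatten ∘ map over a filter, as a flatMap
theorem pvFilter_map_flatten {α : Type} (L : List α) (c : α → Bool) (f : α → List Char) :
    ((L.filter c).map f).flatten = L.flatMap (fun s => if c s then f s else []) := by
  induction L with
  | nil => simp
  | cons h t ih => by_cases hc : c h <;> simp [hc, ih]

theorem pvFlatten_map_flatMap {α β : Type} (l : List β) (g : β → List α) (f : α → List Char) :
    (((l.flatMap g).map f)).flatten = l.flatMap (fun i => ((g i).map f).flatten) := by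
  induction l with
  | nil => simp
  | cons h t ih => simp [List.flatMap_cons, ih]

theorem pvKey_eq (t : String) : pvKey t =
    (if t = "1. Introduction" then 0 else if t = "2. Overall Description" then 1
     else if t = "3. System Features" then 2 else if t = "4. External Interface Requirements" then 3
     else if t = "5. Other Nonfunctional Requirements" then 4
     else if t = "Appendix B: Analysis Models" then 5 else 6) := by
  have h : pvRank.items = [("1. Introduction",0),("2. Overall Description",1),("3. System Features",2),("4. External Interface Requirements",3),("5. Other Nonfunctional Requirements",4),("Appendix B: Analysis Models",5)] := by decide
  simp only [pvKey, PySem.Dict.getD, PySem.Dict.get?, h, List.find?]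
  by_cases h1 : "1. Introduction" = t
  · subst h1; decide
  by_cases h2 : "2. Overall Description" = t
  · subst h2; decide
  by_cases h3 : "3. System Features" = t
  · subst h3; decide
  by_cases h4 : "4. External Interface Requirements" = t
  · subst h4; decide
  by_cases h5 : "5. Other Nonfunctional Requirements" = t
  · subst h5; decide
  by_cases h6 : "Appendix B: Analysis Models" = t
  · subst h6; decide
  have e1 : ("1. Introduction" == t) = false := by simpa using h1
  have e2 : ("2. Overall Description" == t) = false := by simpa using h2
  have e3 : ("3. System Features" == t) = false := by simpa using h3
  have e4 : ("4. External Interface Requirements" == t) = false := by simpa using h4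
  have e5 : ("5. Other Nonfunctional Requirements" == t) = false := by simpa using h5
  have e6 : ("Appendix B: Analysis Models" == t) = false := by simpa using h6
  have n1 : ¬ t = "1. Introduction" := fun h => h1 h.symm
  have n2 : ¬ t = "2. Overall Description" := fun h => h2 h.symm
  have n3 : ¬ t = "3. System Features" := fun h => h3 h.symm
  have n4 : ¬ t = "4. External Interface Requirements" := fun h => h4 h.symm
  have n5 : ¬ t = "5. Other Nonfunctional Requirements" := fun h => h5 h.symm
  have n6 : ¬ t = "Appendix B: Analysis Models" := fun h => h6 h.symm
  rw [e1, e2, e3, e4, e5, e6, if_neg n1, if_neg n2, if_neg n3, if_neg n4, if_neg n5, if_neg n6]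
  rfl

theorem pvKey_mem (t : String) : pvKey t ∈ ([0,1,2,3,4,5,6] : List Int) := by
  rw [pvKey_eq]; split_ifs <;> simp

theorem pvKey_six (t : String) : (pvKey t == 6) = !(pvOrderedSections.contains t) := by
  rw [pvKey_eq]
  simp only [pvOrderedSections, List.contains_eq_mem, List.mem_cons, List.not_mem_nil, or_false]
  split_ifs <;> simp_all

theorem pvKey_i (t : String) (i : Int) (s : String)
    (hi : (i, s) ∈ ([((0:Int), "1. Introduction"), (1, "2. Overall Description"),
        (2, "3. System Features"), (3, "4. External Interface Requirements"),
        (4, "5. Other Nonfunctional Requirements"), (5, "Appendix B: Analysis Models")])) :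
    (pvKey t == i) = (s == t) := by
  rw [pvKey_eq]
  fin_cases hi <;> split_ifs <;> simp_all <;> (intro h; exact ‹¬ _ = _› h.symm)

-- one section's contribution to the document, as a dict lookup
theorem pvChunk (req : List (String × String)) (hnd : (req.map Prod.fst).Nodup) (s : String) :
    ((req.filter (fun p => s == p.1)).map
        (fun p => ("## " ++ p.1 ++ "\n\n" ++ p.2 ++ "\n\n---\n\n").toList)).flatten
      = if (PySem.Dict.mk req).contains s then
          ("## " ++ s ++ "\n\n" ++ (PySem.Dict.mk req).getD s "" ++ "\n\n---\n\n").toList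
        else [] := by
  rw [pvFilter_eq_lookup req hnd s, PySem.Dict.contains_eq_isSome_get?,
      PySem.Dict.getD_eq_get?_getD]
  cases hq : (PySem.Dict.mk req).get? s <;> simp

theorem pvBucket_eq (req : List (String × String)) (i : Int) (s : String)
    (hi : (i, s) ∈ ([((0:Int), "1. Introduction"), (1, "2. Overall Description"),
        (2, "3. System Features"), (3, "4. External Interface Requirements"),
        (4, "5. Other Nonfunctional Requirements"), (5, "Appendix B: Analysis Models")])) :
    req.filter (fun p => pvKey p.1 == i) = req.filter (fun p => s == p.1) :=
  List.filter_congr fun p _ => pvKey_i p.1 i s hi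

theorem pvTail_eq (req : List (String × String)) :
    req.filter (fun p => pvKey p.1 == 6)
      = req.filter (fun p => !(pvOrderedSections.contains p.1)) :=
  List.filter_congr fun p _ => pvKey_six p.1

set_option maxHeartbeats 1600000 in
theorem pvSorted_req (req : List (String × String)) :
    PySem.List.sorted req (fun kv => pvKey kv.1) false
      = ([0,1,2,3,4,5,6] : List Int).flatMap (fun i => req.filter (fun p => pvKey p.1 == i)) := by
  apply pvSorted_buckets (fun kv => pvKey kv.1) ([0,1,2,3,4,5,6]) (by decide) req
    (fun p _ => pvKey_mem p.1)

-- ===== VERDICT =====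
set_option maxHeartbeats 1600000 in
theorem build_full_doc_py_spec : Claim_equal_build_full_doc_py := by
  intro pn req _hdom hpre
  unfold Spec_build_full_doc_py build_full_doc_py build_full_doc_py_alt
  apply pvStr_ext
  rw [pvToList_join, pvFoldl_str_unless, pvFoldl_str_if,
      show (fun kv : String × String => pvRank.getD kv.1 ((pvOrderedSections.length : Int)))
        = (fun kv : String × String => pvKey kv.1) from rfl, pvSorted_req req]
  simp only [List.map_cons, List.flatten_cons, List.map_map, Function.comp_def]
  rw [pvFlatten_map_flatMap]
  simp only [List.flatMap_cons, List.flatMap_nil,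
    pvBucket_eq req 0 "1. Introduction" (by decide),
    pvBucket_eq req 1 "2. Overall Description" (by decide),
    pvBucket_eq req 2 "3. System Features" (by decide),
    pvBucket_eq req 3 "4. External Interface Requirements" (by decide),
    pvBucket_eq req 4 "5. Other Nonfunctional Requirements" (by decide),
    pvBucket_eq req 5 "Appendix B: Analysis Models" (by decide), pvTail_eq req]
  rw [pvChunk req hpre "1. Introduction", pvChunk req hpre "2. Overall Description",
      pvChunk req hpre "3. System Features", pvChunk req hpre "4. External Interface Requirements",
      pvChunk req hpre "5. Other Nonfunctional Requirements", pvChunk req hpre "Appendix B: Analysis Models"]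
  rw [pvFilter_map_flatten]
  simp only [pvOrderedSections, List.flatMap_cons, List.flatMap_nil]
  simp [List.append_assoc]
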